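-- pv_equiv track=rewrite | github.com/lazypolymath/ulauncher-fontawesome | main.py | _search_icons
-- ===== SOURCE A (Python) =====
-- def _search_icons(query, icons_data):
--     """Search for icons matching the query"""
--     query = query.lower()
--     matched_icons = []
--
--     for icon_name, icon_data in icons_data.items():
--         # Check if query matches icon name or search terms
--         if (query in icon_name.lower() or
--             any(query in tag.lower() for tag in icon_data.get("search_terms", []))):
--             matched_icons.append((icon_name, icon_data))
--
--     # Sort results by relevance
--     matched_icons.sort(key=lambda x: (
--         0 if x[0].lower() == query else
--         1 if x[0].lower().startswith(query) else
--         2 if query in x[0].lower() else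
--         3  # For matches in search terms only
--     ))
--
--     # Limit results to 10
--     return matched_icons[:10]
-- ===== SOURCE B (Python) =====
-- def _search_icons(query, icons_data):
--     """Search for icons matching the query (bucket partition instead of sort)"""
--     q = query.lower()
--     buckets = ([], [], [], [])
--     for icon_name, icon_data in icons_data.items():
--         name = icon_name.lower()
--         if q in name:
--             rank = 0 if name == q else 1 if name.startswith(q) else 2
--         elif any(q in tag.lower() for tag in icon_data.get("search_terms", [])):
--             rank = 3
--         else:
--             continue
--         buckets[rank].append((icon_name, icon_data))
--     merged = buckets[0] + buckets[1] + buckets[2] + buckets[3]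
--     return merged[:10]
-- ===== Notes on version B (the rewrite author's own statement) =====
-- stated objective: alternative
-- what changed: Replaces filter-then-stable-sort with a single pass that drops each matching icon into one of four rank buckets, then concatenates the buckets and takes the first 10; insertion order within buckets reproduces the stable sort's tie-breaking.
import Mathlib
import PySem

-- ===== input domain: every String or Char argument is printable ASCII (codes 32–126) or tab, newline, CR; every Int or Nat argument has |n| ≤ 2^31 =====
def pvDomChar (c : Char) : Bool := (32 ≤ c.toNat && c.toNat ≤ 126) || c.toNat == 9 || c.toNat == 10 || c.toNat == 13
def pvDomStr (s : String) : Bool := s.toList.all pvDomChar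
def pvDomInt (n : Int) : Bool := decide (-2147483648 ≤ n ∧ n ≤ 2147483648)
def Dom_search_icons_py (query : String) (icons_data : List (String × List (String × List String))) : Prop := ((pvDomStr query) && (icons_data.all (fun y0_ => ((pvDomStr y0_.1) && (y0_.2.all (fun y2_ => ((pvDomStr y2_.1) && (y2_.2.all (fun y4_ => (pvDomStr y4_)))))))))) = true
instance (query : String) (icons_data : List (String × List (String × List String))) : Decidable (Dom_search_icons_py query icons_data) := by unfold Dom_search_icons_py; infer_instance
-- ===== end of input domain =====

-- B replaces A's filter-then-stable-sort with a single-pass four-bucket partition by rank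
-- (concatenate buckets, take 10); equal output since bucket order reproduces the stable sort.


-- ===== PORT A =====
-- icon_data.get("search_terms", []) — first-match association-list lookup with default []
def pvGetSearchTerms (d : List (String × List String)) : List String :=
  match d.find? (fun kv => kv.1 == "search_terms") with
  | some kv => kv.2
  | none => []

def search_icons_py (query : String) (icons_data : List (String × List (String × List String))) : List (String × (List (String × List String))) :=
  let q := PySem.Str.lower query
  let matched := icons_data.foldl (fun acc p =>
    if PySem.Str.isIn q (PySem.Str.lower p.1) ||
       (pvGetSearchTerms p.2).any (fun tag => PySem.Str.isIn q (PySem.Str.lower tag))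
    then acc ++ [p] else acc) []
  let sortedM := PySem.List.sorted matched (fun x =>
    if PySem.Str.lower x.1 = q then (0 : Nat)
    else if PySem.Str.startswith (PySem.Str.lower x.1) q then 1
    else if PySem.Str.isIn q (PySem.Str.lower x.1) then 2
    else 3)
  PySem.List.slice sortedM none (some 10)

-- ===== PORT B =====
def search_icons_py_alt (query : String) (icons_data : List (String × List (String × List String))) : List (String × (List (String × List String))) :=
  let q := PySem.Str.lower query
  let b := icons_data.foldl (fun b p =>
    let name := PySem.Str.lower p.1
    if PySem.Str.isIn q name then
      if name = q then (b.1 ++ [p], b.2.1, b.2.2.1, b.2.2.2)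
      else if PySem.Str.startswith name q then (b.1, b.2.1 ++ [p], b.2.2.1, b.2.2.2)
      else (b.1, b.2.1, b.2.2.1 ++ [p], b.2.2.2)
    else if (pvGetSearchTerms p.2).any (fun tag => PySem.Str.isIn q (PySem.Str.lower tag)) then
      (b.1, b.2.1, b.2.2.1, b.2.2.2 ++ [p])
    else b)
    (([] : List (String × List (String × List String))), [], [], [])
  (b.1 ++ b.2.1 ++ b.2.2.1 ++ b.2.2.2).take 10

-- ===== PRECONDITION & SPEC =====
def Spec_search_icons_py (query : String) (icons_data : List (String × List (String × List String))) (out : List (String × (List (String × List String)))) : Prop := out = search_icons_py_alt query icons_data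
instance (query : String) (icons_data : List (String × List (String × List String))) (out : List (String × (List (String × List String)))) : Decidable (Spec_search_icons_py query icons_data out) := by unfold Spec_search_icons_py; infer_instance

-- ===== CLAIM (what is proved, stated in full; the proofs are below) =====
def Claim_equal_search_icons_py : Prop := ∀ (query : String) (icons_data : List (String × List (String × List String))), Dom_search_icons_py query icons_data → Spec_search_icons_py query icons_data (search_icons_py query icons_data)

-- ===== LEMMAS AND PROOFS =====

-- inserting x into a partitioned list: skip the ≤-keys, land before the >-keys (stability)
theorem pv_insertBy_partition {α : Type} (key : α → Nat) (x : α) (ys zs : List α)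
    (hys : ∀ y ∈ ys, ¬ key x < key y) (hzs : ∀ z ∈ zs, key x < key z) :
    PySem.List.insertBy (fun a b => decide (key a < key b)) x (ys ++ zs) = ys ++ x :: zs := by
  induction ys with
  | nil =>
    cases zs with
    | nil => simp [PySem.List.insertBy]
    | cons z zs => simp [PySem.List.insertBy, hzs z (by simp)]
  | cons y ys ih =>
    have hy : ¬ key x < key y := hys y (by simp)
    simp only [List.cons_append, PySem.List.insertBy, hy, decide_false, Bool.false_eq_true,
      if_false]
    exact congrArg (y :: ·) (ih (fun a ha => hys a (by simp [ha])))

-- the insertion-sort fold over a 0..3-valued key keeps the list as the four rank buckets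
theorem pv_foldl_insertBy_partition {α : Type} (key : α → Nat) (hk : ∀ x, key x ≤ 3) :
    ∀ (l c0 c1 c2 c3 : List α),
      (∀ x ∈ c0, key x = 0) → (∀ x ∈ c1, key x = 1) → (∀ x ∈ c2, key x = 2) → (∀ x ∈ c3, key x = 3) →
      l.foldl (fun acc x => PySem.List.insertBy (fun a b => decide (key a < key b)) x acc)
        (c0 ++ c1 ++ c2 ++ c3)
      = (c0 ++ l.filter (fun x => decide (key x = 0))) ++ (c1 ++ l.filter (fun x => decide (key x = 1)))
        ++ (c2 ++ l.filter (fun x => decide (key x = 2))) ++ (c3 ++ l.filter (fun x => decide (key x = 3))) := by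
  intro l
  induction l with
  | nil => intro c0 c1 c2 c3 _ _ _ _; simp
  | cons x l ih =>
    intro c0 c1 c2 c3 h0 h1 h2 h3
    have hx := hk x
    simp only [List.foldl_cons]
    interval_cases h : key x
    · have hins : PySem.List.insertBy (fun a b => decide (key a < key b)) x (c0 ++ c1 ++ c2 ++ c3)
          = (c0 ++ [x]) ++ c1 ++ c2 ++ c3 := by
        have := pv_insertBy_partition key x c0 (c1 ++ c2 ++ c3)
          (fun y hy => by simp [h0 y hy, h]) (fun z hz => by
            rcases (by simpa using hz : z ∈ c1 ∨ z ∈ c2 ∨ z ∈ c3) with hz | hz | hz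
            · simp [h1 z hz, h]
            · simp [h2 z hz, h]
            · simp [h3 z hz, h])
        simp only [List.append_assoc] at this ⊢
        simpa using this
      rw [hins, ih (c0 ++ [x]) c1 c2 c3 (by intro a ha; rcases (by simpa using ha : a ∈ c0 ∨ a = x) with ha | rfl; exacts [h0 a ha, h]) h1 h2 h3]
      simp [List.filter_cons, h, List.append_assoc]
    · have hins : PySem.List.insertBy (fun a b => decide (key a < key b)) x (c0 ++ c1 ++ c2 ++ c3)
          = c0 ++ (c1 ++ [x]) ++ c2 ++ c3 := by
        have := pv_insertBy_partition key x (c0 ++ c1) (c2 ++ c3)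
          (fun y hy => by
            rcases (by simpa using hy : y ∈ c0 ∨ y ∈ c1) with hy | hy
            · simp [h0 y hy, h]
            · simp [h1 y hy, h])
          (fun z hz => by
            rcases (by simpa using hz : z ∈ c2 ∨ z ∈ c3) with hz | hz
            · simp [h2 z hz, h]
            · simp [h3 z hz, h])
        simp only [List.append_assoc] at this ⊢
        simpa using this
      rw [hins, ih c0 (c1 ++ [x]) c2 c3 h0 (by intro a ha; rcases (by simpa using ha : a ∈ c1 ∨ a = x) with ha | rfl; exacts [h1 a ha, h]) h2 h3]
      simp [List.filter_cons, h, List.append_assoc]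
    · have hins : PySem.List.insertBy (fun a b => decide (key a < key b)) x (c0 ++ c1 ++ c2 ++ c3)
          = c0 ++ c1 ++ (c2 ++ [x]) ++ c3 := by
        have := pv_insertBy_partition key x (c0 ++ c1 ++ c2) c3
          (fun y hy => by
            rcases (by simpa using hy : y ∈ c0 ∨ y ∈ c1 ∨ y ∈ c2) with hy | hy | hy
            · simp [h0 y hy, h]
            · simp [h1 y hy, h]
            · simp [h2 y hy, h])
          (fun z hz => by simp [h3 z hz, h])
        simp only [List.append_assoc] at this ⊢
        simpa using this
      rw [hins, ih c0 c1 (c2 ++ [x]) c3 h0 h1 (by intro a ha; rcases (by simpa using ha : a ∈ c2 ∨ a = x) with ha | rfl; exacts [h2 a ha, h]) h3]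
      simp [List.filter_cons, h, List.append_assoc]
    · have hins : PySem.List.insertBy (fun a b => decide (key a < key b)) x (c0 ++ c1 ++ c2 ++ c3)
          = c0 ++ c1 ++ c2 ++ (c3 ++ [x]) := by
        have := pv_insertBy_partition key x (c0 ++ c1 ++ c2 ++ c3) []
          (fun y hy => by
            rcases (by simpa using hy : y ∈ c0 ∨ y ∈ c1 ∨ y ∈ c2 ∨ y ∈ c3) with hy | hy | hy | hy
            · simp [h0 y hy, h]
            · simp [h1 y hy, h]
            · simp [h2 y hy, h]
            · simp [h3 y hy, h])
          (fun z hz => by simp at hz)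
        simp only [List.append_assoc] at this ⊢
        simpa using this
      rw [hins, ih c0 c1 c2 (c3 ++ [x]) h0 h1 h2 (by intro a ha; rcases (by simpa using ha : a ∈ c3 ∨ a = x) with ha | rfl; exacts [h3 a ha, h])]
      simp [List.filter_cons, h, List.append_assoc]

-- a stable sort by a 0..3-valued key is the concatenation of the four rank filters
theorem pv_sorted_partition4 {α : Type} (key : α → Nat) (hk : ∀ x, key x ≤ 3) (l : List α) :
    PySem.List.sorted l key
      = l.filter (fun x => decide (key x = 0)) ++ l.filter (fun x => decide (key x = 1))
        ++ l.filter (fun x => decide (key x = 2)) ++ l.filter (fun x => decide (key x = 3)) := by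
  rw [PySem.List.sorted_eq_foldl_insertBy]
  simpa using pv_foldl_insertBy_partition key hk l [] [] [] []
    (by simp) (by simp) (by simp) (by simp)

-- B's bucket fold, characterised: each component is the corresponding rank filter
theorem pv_alt_foldl (q : String) :
    ∀ (l : List (String × List (String × List String)))
      (b : List (String × List (String × List String)) × List (String × List (String × List String)) ×
           List (String × List (String × List String)) × List (String × List (String × List String))),
      l.foldl (fun b p =>
        if PySem.Str.isIn q (PySem.Str.lower p.1) then
          if PySem.Str.lower p.1 = q then (b.1 ++ [p], b.2.1, b.2.2.1, b.2.2.2)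
          else if PySem.Str.startswith (PySem.Str.lower p.1) q then (b.1, b.2.1 ++ [p], b.2.2.1, b.2.2.2)
          else (b.1, b.2.1, b.2.2.1 ++ [p], b.2.2.2)
        else if (pvGetSearchTerms p.2).any (fun tag => PySem.Str.isIn q (PySem.Str.lower tag)) then
          (b.1, b.2.1, b.2.2.1, b.2.2.2 ++ [p])
        else b) b
      = (b.1 ++ l.filter (fun p => PySem.Str.isIn q (PySem.Str.lower p.1) && decide (PySem.Str.lower p.1 = q)),
         b.2.1 ++ l.filter (fun p => PySem.Str.isIn q (PySem.Str.lower p.1) && !decide (PySem.Str.lower p.1 = q) && PySem.Str.startswith (PySem.Str.lower p.1) q),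
         b.2.2.1 ++ l.filter (fun p => PySem.Str.isIn q (PySem.Str.lower p.1) && !decide (PySem.Str.lower p.1 = q) && !PySem.Str.startswith (PySem.Str.lower p.1) q),
         b.2.2.2 ++ l.filter (fun p => !PySem.Str.isIn q (PySem.Str.lower p.1) && (pvGetSearchTerms p.2).any (fun tag => PySem.Str.isIn q (PySem.Str.lower tag)))) := by
  intro l
  induction l with
  | nil => intro b; simp
  | cons p l ih =>
    intro b
    rw [List.foldl_cons, ih]
    by_cases hin : PySem.Chars.isIn q.toList (PySem.Chars.lower p.1.toList) = true
    · by_cases heq : PySem.Str.lower p.1 = q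
      · simp [hin, heq, PySem.Chars.isIn_iff_infix, List.filter_cons,
          List.append_assoc]
      · by_cases hsw : PySem.Chars.startswith (PySem.Chars.lower p.1.toList) q.toList = true
        · simp [hin, heq, hsw, List.filter_cons, List.append_assoc]
        · simp [hin, heq, hsw, List.filter_cons, List.append_assoc]
    · by_cases htag : ∃ x ∈ pvGetSearchTerms p.2, PySem.Chars.isIn q.toList (PySem.Chars.lower x.toList) = true
      · simp [hin, htag, List.filter_cons, List.append_assoc]
      · simp [hin, htag, List.filter_cons, List.append_assoc]

-- ===== VERDICT (by name: the statement is the Claim_ definition above) =====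
theorem search_icons_py_spec : Claim_equal_search_icons_py := by
  intro query icons_data _
  unfold Spec_search_icons_py
  simp only [search_icons_py, search_icons_py_alt]
  set q := PySem.Str.lower query with hq
  set key : (String × List (String × List String)) → Nat := fun x =>
    if PySem.Str.lower x.1 = q then (0 : Nat)
    else if PySem.Str.startswith (PySem.Str.lower x.1) q then 1
    else if PySem.Str.isIn q (PySem.Str.lower x.1) then 2
    else 3 with hkey
  have hk : ∀ x, key x ≤ 3 := by intro x; simp only [hkey]; split_ifs <;> omega
  have hA : List.foldl
      (fun acc p =>
        if PySem.Str.isIn q (PySem.Str.lower p.1) ||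
            (pvGetSearchTerms p.2).any (fun tag => PySem.Str.isIn q (PySem.Str.lower tag))
        then acc ++ [p] else acc) [] icons_data
      = List.filter
          (fun p => PySem.Str.isIn q (PySem.Str.lower p.1) ||
            (pvGetSearchTerms p.2).any (fun tag => PySem.Str.isIn q (PySem.Str.lower tag)))
          icons_data := by
    simpa using PySem.List.foldl_append_if_eq_filter
      (fun p => PySem.Str.isIn q (PySem.Str.lower p.1) ||
        (pvGetSearchTerms p.2).any (fun tag => PySem.Str.isIn q (PySem.Str.lower tag)))
      icons_data []
  rw [hA]
  rw [pv_sorted_partition4 key hk]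
  rw [pv_alt_foldl q icons_data]
  simp only [List.nil_append, List.filter_filter]
  have e0 : ∀ x : String × List (String × List String),
      (decide (key x = 0) && (PySem.Str.isIn q (PySem.Str.lower x.1) ||
        (pvGetSearchTerms x.2).any (fun tag => PySem.Str.isIn q (PySem.Str.lower tag))))
      = (PySem.Str.isIn q (PySem.Str.lower x.1) && decide (PySem.Str.lower x.1 = q)) := by
    intro x
    by_cases heq : PySem.Str.lower x.1 = q
    · simp [hkey, heq, PySem.Chars.isIn_iff_infix]
    · simp only [hkey, if_neg heq]
      split_ifs <;> simp [heq]
  have e1 : ∀ x : String × List (String × List String),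
      (decide (key x = 1) && (PySem.Str.isIn q (PySem.Str.lower x.1) ||
        (pvGetSearchTerms x.2).any (fun tag => PySem.Str.isIn q (PySem.Str.lower tag))))
      = (PySem.Str.isIn q (PySem.Str.lower x.1) && !decide (PySem.Str.lower x.1 = q) &&
          PySem.Str.startswith (PySem.Str.lower x.1) q) := by
    intro x
    by_cases heq : PySem.Str.lower x.1 = q
    · simp [hkey, heq]
    · by_cases hsw : PySem.Chars.startswith (PySem.Chars.lower x.1.toList) q.toList = true
      · have hin : PySem.Chars.isIn q.toList (PySem.Chars.lower x.1.toList) = true := by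
          rw [PySem.Chars.isIn_iff_infix]
          exact ((PySem.Chars.startswith_iff _ _).mp hsw).isInfix
        simp [hkey, heq, hsw, hin]
      · by_cases hin : PySem.Chars.isIn q.toList (PySem.Chars.lower x.1.toList) = true
        · simp [hkey, heq, hsw, hin]
        · simp [hkey, heq, hsw, hin]
  have e2 : ∀ x : String × List (String × List String),
      (decide (key x = 2) && (PySem.Str.isIn q (PySem.Str.lower x.1) ||
        (pvGetSearchTerms x.2).any (fun tag => PySem.Str.isIn q (PySem.Str.lower tag))))
      = (PySem.Str.isIn q (PySem.Str.lower x.1) && !decide (PySem.Str.lower x.1 = q) &&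
          !PySem.Str.startswith (PySem.Str.lower x.1) q) := by
    intro x
    by_cases heq : PySem.Str.lower x.1 = q
    · simp [hkey, heq]
    · by_cases hsw : PySem.Chars.startswith (PySem.Chars.lower x.1.toList) q.toList = true
      · simp [hkey, heq, hsw]
      · by_cases hin : PySem.Chars.isIn q.toList (PySem.Chars.lower x.1.toList) = true
        · simp [hkey, heq, hsw, hin]
        · simp [hkey, heq, hsw, hin]
  have e3 : ∀ x : String × List (String × List String),
      (decide (key x = 3) && (PySem.Str.isIn q (PySem.Str.lower x.1) ||
        (pvGetSearchTerms x.2).any (fun tag => PySem.Str.isIn q (PySem.Str.lower tag))))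
      = (!PySem.Str.isIn q (PySem.Str.lower x.1) &&
          (pvGetSearchTerms x.2).any (fun tag => PySem.Str.isIn q (PySem.Str.lower tag))) := by
    intro x
    by_cases hin : PySem.Chars.isIn q.toList (PySem.Chars.lower x.1.toList) = true
    · have h3 : decide (key x = 3) = false := by
        simp only [hkey]
        by_cases heq : PySem.Str.lower x.1 = q
        · simp [heq]
        · by_cases hsw : PySem.Chars.startswith (PySem.Chars.lower x.1.toList) q.toList = true
          · simp [heq, hsw]
          · simp [heq, hsw, hin]
      simp [h3, hin]
    · have hne : ¬ PySem.Str.lower x.1 = q := fun hc => by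
        rw [PySem.Chars.isIn_iff_infix] at hin
        refine hin ?_
        have hb : (PySem.Str.lower x.1).toList = PySem.Chars.lower x.1.toList := by
          simp [pysem]
        rw [← hb, hc]
      have hns : ¬ PySem.Chars.startswith (PySem.Chars.lower x.1.toList) q.toList = true :=
        fun hc => hin (by
          rw [PySem.Chars.isIn_iff_infix]
          exact ((PySem.Chars.startswith_iff _ _).mp hc).isInfix)
      simp [hkey, hne, hns, hin]
  rw [List.filter_congr (fun a _ => e0 a), List.filter_congr (fun a _ => e1 a),
      List.filter_congr (fun a _ => e2 a), List.filter_congr (fun a _ => e3 a)]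
  simp [pysem, List.append_assoc]
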